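-- pv_equiv track=rewrite | github.com/heesters-nick/unionsdata | src/unionsdata/verification.py | _split_into_hdus
-- ===== SOURCE A (Python) =====
-- def _split_into_hdus(lines: list[str]) -> list[list[str]]:
--     """Split header lines into separate HDUs (split on END cards)."""
--     hdus = []
--     current_hdu = []
--
--     for line in lines:
--         current_hdu.append(line.rstrip())
--         if line.strip().startswith('END'):
--             hdus.append(current_hdu)
--             current_hdu = []
--
--     return hdus
-- ===== SOURCE B (Python) =====
-- def _first_end_index(lines):
--     for i, line in enumerate(lines):
--         if line.strip().startswith('END'):
--             return i
--     return None
--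
--
-- def _split_into_hdus(lines: list[str]) -> list[list[str]]:
--     """Split header lines into separate HDUs (split on END cards)."""
--     k = _first_end_index(lines)
--     if k is None:
--         return []
--     return [[l.rstrip() for l in lines[:k + 1]]] + _split_into_hdus(lines[k + 1:])
-- ===== Notes on version B (the rewrite author's own statement) =====
-- stated objective: alternative
-- what changed: Replaced A's single accumulator loop (growing a current-HDU buffer line by line) with a recursive decomposition: find the index of the first END card, emit that slice rstripped, and recurse on the remainder; trailing lines after the last END are dropped because the recursion stops when no END is found.
import Mathlib
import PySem

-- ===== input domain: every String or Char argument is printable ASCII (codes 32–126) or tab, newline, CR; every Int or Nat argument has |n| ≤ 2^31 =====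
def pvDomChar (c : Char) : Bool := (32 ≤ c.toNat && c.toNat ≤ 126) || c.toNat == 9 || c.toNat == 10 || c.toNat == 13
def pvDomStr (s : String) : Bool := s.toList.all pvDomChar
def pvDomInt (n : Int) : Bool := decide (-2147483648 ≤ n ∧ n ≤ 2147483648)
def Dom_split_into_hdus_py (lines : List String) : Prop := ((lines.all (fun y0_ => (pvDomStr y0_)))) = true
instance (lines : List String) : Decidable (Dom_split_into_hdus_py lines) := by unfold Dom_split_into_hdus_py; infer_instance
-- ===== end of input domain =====

-- B replaces A's accumulator loop by a find-first-END-then-recurse decomposition (alternative, same cost).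


-- ===== PORT A =====
-- literal transliteration of A: one fold carrying (hdus, current_hdu)
def split_into_hdus_py (lines : List String) : List (List String) :=
  (lines.foldl (fun (st : List (List String) × List String) line =>
      let cur := st.2 ++ [PySem.Str.rstrip line]
      if PySem.Str.startswith (PySem.Str.strip line) "END"
      then (st.1 ++ [cur], ([] : List String))
      else (st.1, cur))
    ([], [])).1

-- ===== PORT B =====
-- helper of B: index of the first line whose strip() starts with 'END' (None if absent)
def first_end_index : List String → Option Nat
  | [] => none
  | l :: ls =>
    if PySem.Str.startswith (PySem.Str.strip l) "END" then some 0
    else (first_end_index ls).map (· + 1)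

-- B: find first END, emit lines[:k+1] rstripped, recurse on lines[k+1:]
-- (k ≥ 0, so the Python slices lines[:k+1] / lines[k+1:] are exactly take / drop)
def split_into_hdus_py_alt (lines : List String) : List (List String) :=
  match h : first_end_index lines with
  | none => []
  | some k =>
    ((lines.take (k + 1)).map PySem.Str.rstrip)
      :: split_into_hdus_py_alt (lines.drop (k + 1))
termination_by lines.length
decreasing_by
  cases lines with
  | nil => simp [first_end_index] at h
  | cons a as => simp

-- ===== PRECONDITION & SPEC =====
def Spec_split_into_hdus_py (lines : List String) (out : List (List String)) : Prop := out = split_into_hdus_py_alt lines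
instance (lines : List String) (out : List (List String)) : Decidable (Spec_split_into_hdus_py lines out) := by unfold Spec_split_into_hdus_py; infer_instance

-- ===== CLAIM (what is proved, stated in full; the proofs are below) =====
def Claim_equal_split_into_hdus_py : Prop := ∀ (lines : List String), Dom_split_into_hdus_py lines → Spec_split_into_hdus_py lines (split_into_hdus_py lines)

-- ===== LEMMAS AND PROOFS =====

-- intermediate view of A's loop: the HDUs still to be emitted, given the pending buffer cur
def auxA (cur : List String) : List String → List (List String)
  | [] => []
  | l :: ls =>
    if PySem.Str.startswith (PySem.Str.strip l) "END"
    then (cur ++ [PySem.Str.rstrip l]) :: auxA [] ls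
    else auxA (cur ++ [PySem.Str.rstrip l]) ls

theorem foldA_eq_auxA (lines : List String) (acc : List (List String)) (cur : List String) :
    (lines.foldl (fun (st : List (List String) × List String) line =>
        let c := st.2 ++ [PySem.Str.rstrip line]
        if PySem.Str.startswith (PySem.Str.strip line) "END"
        then (st.1 ++ [c], ([] : List String))
        else (st.1, c))
      (acc, cur)).1 = acc ++ auxA cur lines := by
  induction lines generalizing acc cur with
  | nil => simp [auxA]
  | cons l ls ih =>
    cases h : PySem.Str.startswith (PySem.Str.strip l) "END" with
    | true =>
      simp only [List.foldl_cons, auxA, h, if_true]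
      rw [ih]
      simp
    | false =>
      simp only [List.foldl_cons, auxA, h, Bool.false_eq_true, if_false]
      rw [ih]

theorem auxA_eq_alt (lines : List String) (cur : List String) :
    auxA cur lines =
      match first_end_index lines with
      | none => []
      | some k =>
        (cur ++ (lines.take (k + 1)).map PySem.Str.rstrip)
          :: split_into_hdus_py_alt (lines.drop (k + 1)) := by
  induction lines generalizing cur with
  | nil => simp [auxA, first_end_index]
  | cons l ls ih =>
    cases h : PySem.Str.startswith (PySem.Str.strip l) "END" with
    | true =>
      have hrest : auxA [] ls = split_into_hdus_py_alt ls := by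
        rw [ih]
        rw [split_into_hdus_py_alt]
        cases hk : first_end_index ls <;> simp
      simp only [auxA, first_end_index, h, if_true, hrest]
      simp
    | false =>
      simp only [auxA, first_end_index, h, Bool.false_eq_true, if_false]
      rw [ih]
      cases hk : first_end_index ls with
      | none => simp
      | some k => simp [List.take_succ_cons, List.append_assoc]

theorem split_into_hdus_py_spec_aux (lines : List String) :
    split_into_hdus_py lines = split_into_hdus_py_alt lines := by
  unfold split_into_hdus_py
  rw [foldA_eq_auxA lines [] [], auxA_eq_alt]
  rw [split_into_hdus_py_alt]
  cases hk : first_end_index lines <;> simp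

-- ===== VERDICT (by name: the statement is the Claim_ definition above) =====
theorem split_into_hdus_py_spec : Claim_equal_split_into_hdus_py := by
  intro lines _
  exact split_into_hdus_py_spec_aux lines
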